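-- pv_equiv track=rewrite | github.com/umutsevdi/unix-assistant | voice-recognition/main.py | text_processor
-- ===== SOURCE A (Python) =====
-- directory = {
--     #komutlar
--
--     "list":"ls ",
--     "remove":"rm ",
--     "make_directory":"mkdir ",
--     "process":"ps ",
--     "touch":"touch ",
--     "echo":"echo ",
--     #parameters
--
--     "recursive":"-r ",
--     "verbose":"-v ",
--     "help":"-h ",
--     "force":"-f ",
--
-- }
--
-- def text_processor(string):
--
--     new_str = ""
--     output = ""
--     speacial_cases = ["change","make"]
--     for word in string.split():
--         new_str+=word
--         if word in speacial_cases: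
--             new_str+="_"
--         else:
--             new_str+=" "
--
--
--     for word in new_str.split():
--
--         if word in directory:
--             word = directory[word]
--         output += word
--     return output
-- ===== SOURCE B (Python) =====
-- directory = {
--     "list": "ls ",
--     "remove": "rm ",
--     "make_directory": "mkdir ",
--     "process": "ps ",
--     "touch": "touch ",
--     "echo": "echo ",
--     "recursive": "-r ",
--     "verbose": "-v ",
--     "help": "-h ",
--     "force": "-f ",
-- }
--
--
-- def text_processor(string):
--     # One pass: group tokens directly into a buffer, no intermediate string / second split.
--     output = ""
--     buffer = ""
--     for token in string.split():
--         if token in ("change", "make"):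
--             buffer += token + "_"
--         else:
--             buffer += token
--             output += directory.get(buffer, buffer)
--             buffer = ""
--     if buffer:
--         output += directory.get(buffer, buffer)
--     return output
-- ===== Notes on version B (the rewrite author's own statement) =====
-- stated objective: simpler
-- what changed: A builds an intermediate glued string (words joined by '_' after 'change'/'make', else ' ') and then re-splits it and maps each piece through the dict in a second loop; B makes a single pass over string.split() keeping a buffer for the current group and emitting directory.get(group, group) as soon as a group closes, with no intermediate string and no second split.
import Mathlib
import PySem

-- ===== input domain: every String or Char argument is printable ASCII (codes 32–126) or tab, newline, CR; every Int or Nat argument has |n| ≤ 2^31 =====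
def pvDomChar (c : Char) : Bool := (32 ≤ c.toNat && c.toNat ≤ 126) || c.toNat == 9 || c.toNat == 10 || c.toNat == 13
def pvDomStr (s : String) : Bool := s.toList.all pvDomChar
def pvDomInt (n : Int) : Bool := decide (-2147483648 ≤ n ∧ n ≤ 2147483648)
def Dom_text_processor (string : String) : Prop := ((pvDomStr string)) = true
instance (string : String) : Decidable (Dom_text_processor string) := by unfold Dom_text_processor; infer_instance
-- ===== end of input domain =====

-- B replaces A's build-a-glued-string-then-resplit-and-map two-pass scheme by a single pass
-- over the words with a buffer (objective: simpler, one traversal, no intermediate string).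

-- the module-level dict 'directory' (shared constant, not part of either algorithm)
def pvDirectory : PySem.Dict (List Char) (List Char) := PySem.Dict.mk
  [ ("list".toList, "ls ".toList)
  , ("remove".toList, "rm ".toList)
  , ("make_directory".toList, "mkdir ".toList)
  , ("process".toList, "ps ".toList)
  , ("touch".toList, "touch ".toList)
  , ("echo".toList, "echo ".toList)
  , ("recursive".toList, "-r ".toList)
  , ("verbose".toList, "-v ".toList)
  , ("help".toList, "-h ".toList)
  , ("force".toList, "-f ".toList) ]

-- speacial_cases = ["change","make"]
def pvSpecials : List (List Char) := ["change".toList, "make".toList]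

-- ===== PORT A =====
def text_processor (string : String) : String :=
  let new_str : List Char :=
    (PySem.Chars.split₀ string.toList).foldl
      (fun s w => (s ++ w) ++ (if w ∈ pvSpecials then ['_'] else [' '])) []
  let output : List Char :=
    (PySem.Chars.split₀ new_str).foldl
      (fun o w => o ++ (match pvDirectory.get? w with | some v => v | none => w)) []
  String.ofList output

-- ===== PORT B =====
-- loop body of Source B: state = (buffer, output)
def pvStepB (st : List Char × List Char) (w : List Char) : List Char × List Char :=
  if w ∈ pvSpecials then (st.1 ++ (w ++ ['_']), st.2)
  else ([], st.2 ++ pvDirectory.getD (st.1 ++ w) (st.1 ++ w))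

def text_processor_alt (string : String) : String :=
  let st := (PySem.Chars.split₀ string.toList).foldl pvStepB ([], [])
  String.ofList (if st.1 = [] then st.2 else st.2 ++ pvDirectory.getD st.1 st.1)

-- ===== PRECONDITION & SPEC =====
def Spec_text_processor (string : String) (out : String) : Prop := out = text_processor_alt string
instance (string : String) (out : String) : Decidable (Spec_text_processor string out) := by unfold Spec_text_processor; infer_instance

-- ===== CLAIM (what is proved, stated in full; the proofs are below) =====
def Claim_equal_text_processor : Prop := ∀ (string : String), Dom_text_processor string → Spec_text_processor string (text_processor string)

-- ===== LEMMAS AND PROOFS =====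

/-- "contains no whitespace" -/
def pvNsfree (cs : List Char) : Prop := ∀ c ∈ cs, PySem.Chars.isspace c = false

/-- separator A appends after a word -/
def pvSep (w : List Char) : List Char := if w ∈ pvSpecials then ['_'] else [' ']

/-- A's first loop, as a flat concatenation -/
def pvFlat : List (List Char) → List Char
  | [] => []
  | w :: ws => (w ++ pvSep w) ++ pvFlat ws

/-- the word groups B forms (and A's second split recovers) -/
def pvGroups : List Char → List (List Char) → List (List Char)
  | buf, [] => if buf = [] then [] else [buf]
  | buf, w :: ws =>
      if w ∈ pvSpecials then pvGroups (buf ++ (w ++ ['_'])) ws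
      else (buf ++ w) :: pvGroups [] ws

theorem pvFoldl_build (ws : List (List Char)) (pre : List Char) :
    ws.foldl (fun s w => (s ++ w) ++ (if w ∈ pvSpecials then ['_'] else [' '])) pre
      = pre ++ pvFlat ws := by
  induction ws generalizing pre with
  | nil => simp [pvFlat]
  | cons w ws ih =>
    rw [List.foldl_cons, ih]
    simp [pvFlat, pvSep, List.append_assoc]

theorem pvGoAcc (s : List Char) : ∀ (cur acc : List Char) (accl : List (List Char)),
    PySem.Chars.split₀.go s cur (acc :: accl)
      = (acc :: accl).reverse ++ PySem.Chars.split₀.go s cur [] := by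
  induction s with
  | nil =>
    intro cur acc accl
    by_cases h : cur = [] <;> simp [PySem.Chars.split₀.go, h]
  | cons c s ih =>
    intro cur acc accl
    by_cases hs : PySem.Chars.isspace c
    · by_cases h : cur = [] <;> simp [PySem.Chars.split₀.go, hs, h, ih]
    · simp [PySem.Chars.split₀.go, hs, ih]

theorem pvGoNs (p : List Char) (hp : pvNsfree p) (rest cur : List Char)
    (accl : List (List Char)) :
    PySem.Chars.split₀.go (p ++ rest) cur accl
      = PySem.Chars.split₀.go rest (p.reverse ++ cur) accl := by
  induction p generalizing cur with
  | nil => simp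
  | cons c p ih =>
    have hc : PySem.Chars.isspace c = false := hp c (by simp)
    have hp' : pvNsfree p := fun d hd => hp d (by simp [hd])
    simp [PySem.Chars.split₀.go, hc, ih hp', List.append_assoc]

theorem pvSplit_free (s : List Char) (hs : pvNsfree s) :
    PySem.Chars.split₀ s = if s = [] then [] else [s] := by
  have h1 := pvGoNs s hs [] [] []
  simp at h1
  by_cases h : s = [] <;>
    simp [PySem.Chars.split₀, h1, PySem.Chars.split₀.go, h]

theorem pvSplit_cons_space (p rest : List Char) (hp : pvNsfree p) (hne : p ≠ []) :
    PySem.Chars.split₀ (p ++ ' ' :: rest) = p :: PySem.Chars.split₀ rest := by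
  have h1 := pvGoNs p hp (' ' :: rest) [] []
  simp at h1
  have h2 := pvGoAcc rest [] p []
  have hsp : PySem.Chars.isspace ' ' = true := by decide
  simp [PySem.Chars.split₀, h1, PySem.Chars.split₀.go, hsp, hne, h2]

theorem pvSplit_words_ok (s : List Char) :
    ∀ w ∈ PySem.Chars.split₀ s, w ≠ [] ∧ pvNsfree w := by
  suffices h : ∀ (s cur : List Char) (acc : List (List Char)),
      pvNsfree cur → (∀ w ∈ acc, w ≠ [] ∧ pvNsfree w) →
      ∀ w ∈ PySem.Chars.split₀.go s cur acc, w ≠ [] ∧ pvNsfree w by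
    intro w hw
    exact h s [] [] (by intro c hc; simp at hc) (by simp) w hw
  intro s
  induction s with
  | nil =>
    intro cur acc hcur hacc w hw
    by_cases h : cur = [] <;> simp [PySem.Chars.split₀.go, h] at hw
    · exact hacc w hw
    · rcases hw with hw | hw
      · exact hacc w hw
      · subst hw
        exact ⟨by simpa using h, fun c hc => hcur c (by simpa using hc)⟩
  | cons c s ih =>
    intro cur acc hcur hacc w hw
    by_cases hs : PySem.Chars.isspace c
    · by_cases h : cur = [] <;> simp [PySem.Chars.split₀.go, hs, h] at hw
      · exact ih [] acc (by intro d hd; simp at hd) hacc w hw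
      · refine ih [] _ (by intro d hd; simp at hd) ?_ w hw
        intro v hv
        rcases List.mem_cons.mp hv with hv | hv
        · subst hv
          exact ⟨by simpa using h, fun d hd => hcur d (by simpa using hd)⟩
        · exact hacc v hv
    · simp [PySem.Chars.split₀.go, hs] at hw
      refine ih (c :: cur) acc ?_ hacc w hw
      intro d hd
      rcases List.mem_cons.mp hd with hd | hd
      · subst hd; simpa using hs
      · exact hcur d hd

theorem pvSplit_flat (ws : List (List Char)) (buf : List Char)
    (hws : ∀ w ∈ ws, w ≠ [] ∧ pvNsfree w) (hbuf : pvNsfree buf) :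
    PySem.Chars.split₀ (buf ++ pvFlat ws) = pvGroups buf ws := by
  induction ws generalizing buf with
  | nil =>
    simp only [pvFlat, List.append_nil, pvGroups]
    exact pvSplit_free buf hbuf
  | cons w ws ih =>
    obtain ⟨hwne, hwns⟩ := hws w (by simp)
    have hws' : ∀ v ∈ ws, v ≠ [] ∧ pvNsfree v := fun v hv => hws v (by simp [hv])
    by_cases hsp : w ∈ pvSpecials
    · have hbuf' : pvNsfree (buf ++ (w ++ ['_'])) := by
        intro c hc
        simp at hc
        rcases hc with hc | hc | hc
        · exact hbuf c hc
        · exact hwns c hc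
        · subst hc; decide
      have harr : buf ++ pvFlat (w :: ws) = (buf ++ (w ++ ['_'])) ++ pvFlat ws := by
        simp [pvFlat, pvSep, hsp, List.append_assoc]
      rw [harr, ih _ hws' hbuf', pvGroups, if_pos hsp]
    · have hbw : pvNsfree (buf ++ w) := by
        intro c hc
        rcases List.mem_append.mp hc with hc | hc
        · exact hbuf c hc
        · exact hwns c hc
      have harr : buf ++ pvFlat (w :: ws) = (buf ++ w) ++ ' ' :: pvFlat ws := by
        simp [pvFlat, pvSep, hsp, List.append_assoc]
      have hnil : PySem.Chars.split₀ ([] ++ pvFlat ws) = pvGroups [] ws :=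
        ih [] hws' (by intro c hc; simp at hc)
      rw [List.nil_append] at hnil
      rw [harr, pvSplit_cons_space _ _ hbw (by simp [hwne]), hnil, pvGroups, if_neg hsp]

theorem pvGetD_match (w : List Char) :
    pvDirectory.getD w w
      = (match pvDirectory.get? w with | some v => v | none => w) := by
  unfold PySem.Dict.getD
  cases pvDirectory.get? w <;> rfl

theorem pvFoldB (ws : List (List Char)) (buf out : List Char) :
    (if (ws.foldl pvStepB (buf, out)).1 = [] then (ws.foldl pvStepB (buf, out)).2
     else (ws.foldl pvStepB (buf, out)).2
            ++ pvDirectory.getD (ws.foldl pvStepB (buf, out)).1 (ws.foldl pvStepB (buf, out)).1)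
      = (pvGroups buf ws).foldl
          (fun o w => o ++ (match pvDirectory.get? w with | some v => v | none => w)) out := by
  induction ws generalizing buf out with
  | nil =>
    by_cases h : buf = [] <;> simp [pvGroups, h, pvGetD_match]
  | cons w ws ih =>
    by_cases hsp : w ∈ pvSpecials
    · rw [List.foldl_cons,
        show pvStepB (buf, out) w = (buf ++ (w ++ ['_']), out) from by simp [pvStepB, hsp],
        ih, pvGroups, if_pos hsp]
    · rw [List.foldl_cons,
        show pvStepB (buf, out) w
            = ([], out ++ pvDirectory.getD (buf ++ w) (buf ++ w)) from by simp [pvStepB, hsp],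
        ih, pvGroups, if_neg hsp, List.foldl_cons, pvGetD_match]

-- ===== VERDICT (by name: the statement is the Claim_ definition above) =====
theorem text_processor_spec : Claim_equal_text_processor := by
  intro string _
  unfold Spec_text_processor text_processor text_processor_alt
  simp only
  have hflat : PySem.Chars.split₀ ([] ++ pvFlat (PySem.Chars.split₀ string.toList))
      = pvGroups [] (PySem.Chars.split₀ string.toList) :=
    pvSplit_flat _ [] (pvSplit_words_ok string.toList) (by intro c hc; simp at hc)
  rw [List.nil_append] at hflat
  rw [pvFoldl_build, List.nil_append, hflat, ← pvFoldB]
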